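-- pv_equiv track=rewrite | github.com/zhaocaho/roleMe | tools/role_ops.py | _next_unasked_slot
-- ===== SOURCE A (Python) =====
-- INTERVIEW_STAGE_ORDER = [
--     "narrative",
--     "language_preference",
--     "communication_style",
--     "decision_rules",
--     "disclosure_layers",
--     "user_memory",
--     "memory_summary",
--     "brain_topics",
--     "projects",
-- ]
--
-- def _next_unasked_slot(answers: dict[str, str], asked_slots: tuple[str, ...]) -> str | None:
--     for slot in INTERVIEW_STAGE_ORDER:
--         if answers.get(slot, "").strip():
--             continue
--         if slot in asked_slots:
--             continue
--         return slot
--     for slot in INTERVIEW_STAGE_ORDER: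
--         if slot in asked_slots:
--             continue
--         return slot
--     return None
-- ===== SOURCE B (Python) =====
-- INTERVIEW_STAGE_ORDER = [
--     "narrative",
--     "language_preference",
--     "communication_style",
--     "decision_rules",
--     "disclosure_layers",
--     "user_memory",
--     "memory_summary",
--     "brain_topics",
--     "projects",
-- ]
--
-- def _next_unasked_slot(answers: dict[str, str], asked_slots: tuple[str, ...]) -> str | None:
--     fallback = None
--     for slot in INTERVIEW_STAGE_ORDER:
--         if slot in asked_slots:
--             continue
--         if not answers.get(slot, "").strip():
--             return slot
--         if fallback is None:
--             fallback = slot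
--     return fallback
-- ===== Notes on version B (the rewrite author's own statement) =====
-- stated objective: simpler
-- what changed: Replaces A's two sequential scans of INTERVIEW_STAGE_ORDER with one pass that returns the first unasked blank slot immediately and otherwise keeps the first unasked (answered) slot as a fallback.
import Mathlib
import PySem

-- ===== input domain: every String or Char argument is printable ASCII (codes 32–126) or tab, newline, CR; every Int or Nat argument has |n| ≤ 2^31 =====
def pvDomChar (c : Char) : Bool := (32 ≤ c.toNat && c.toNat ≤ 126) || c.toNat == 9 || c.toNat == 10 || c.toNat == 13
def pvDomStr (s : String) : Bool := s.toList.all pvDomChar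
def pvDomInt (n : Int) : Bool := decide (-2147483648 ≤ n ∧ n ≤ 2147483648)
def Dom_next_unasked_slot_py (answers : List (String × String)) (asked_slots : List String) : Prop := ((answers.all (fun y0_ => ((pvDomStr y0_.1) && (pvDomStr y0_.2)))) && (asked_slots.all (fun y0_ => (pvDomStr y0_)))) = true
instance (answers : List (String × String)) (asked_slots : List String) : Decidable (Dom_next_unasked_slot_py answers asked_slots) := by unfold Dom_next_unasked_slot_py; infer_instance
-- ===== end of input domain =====

-- B merges A's two sequential scans of INTERVIEW_STAGE_ORDER into one pass carrying a fallback (simpler; same cost).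


def interviewStageOrder : List String :=
  ["narrative", "language_preference", "communication_style", "decision_rules",
   "disclosure_layers", "user_memory", "memory_summary", "brain_topics", "projects"]

-- ===== PORT A =====
-- first for-loop of A: skip slots with a non-blank answer, skip asked slots, return the first remaining
def nusLoop1 (answers : List (String × String)) (asked_slots : List String) : List String → Option String
  | [] => none
  | slot :: rest =>
    if PySem.Str.strip ((PySem.Dict.mk answers).getD slot "") ≠ "" then
      nusLoop1 answers asked_slots rest
    else if asked_slots.contains slot then
      nusLoop1 answers asked_slots rest
    else
      some slot

-- second for-loop of A: return the first slot not in asked_slots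
def nusLoop2 (asked_slots : List String) : List String → Option String
  | [] => none
  | slot :: rest =>
    if asked_slots.contains slot then nusLoop2 asked_slots rest else some slot

def next_unasked_slot_py (answers : List (String × String)) (asked_slots : List String) : Option String :=
  match nusLoop1 answers asked_slots interviewStageOrder with
  | some slot => some slot
  | none => nusLoop2 asked_slots interviewStageOrder

-- ===== PORT B =====
-- B's single loop carrying the fallback
def nusLoopB (answers : List (String × String)) (asked_slots : List String) :
    Option String → List String → Option String
  | fallback, [] => fallback
  | fallback, slot :: rest =>
    if asked_slots.contains slot then
      nusLoopB answers asked_slots fallback rest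
    else if PySem.Str.strip ((PySem.Dict.mk answers).getD slot "") = "" then
      some slot
    else if fallback = none then
      nusLoopB answers asked_slots (some slot) rest
    else
      nusLoopB answers asked_slots fallback rest

def next_unasked_slot_py_alt (answers : List (String × String)) (asked_slots : List String) : Option String :=
  nusLoopB answers asked_slots none interviewStageOrder

-- ===== PRECONDITION & SPEC =====
def Spec_next_unasked_slot_py (answers : List (String × String)) (asked_slots : List String) (out : Option String) : Prop := out = next_unasked_slot_py_alt answers asked_slots
instance (answers : List (String × String)) (asked_slots : List String) (out : Option String) : Decidable (Spec_next_unasked_slot_py answers asked_slots out) := by unfold Spec_next_unasked_slot_py; infer_instance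

-- ===== CLAIM (what is proved, stated in full; the proofs are below) =====
def Claim_equal_next_unasked_slot_py : Prop := ∀ (answers : List (String × String)) (asked_slots : List String), Dom_next_unasked_slot_py answers asked_slots → Spec_next_unasked_slot_py answers asked_slots (next_unasked_slot_py answers asked_slots)

-- ===== LEMMAS AND PROOFS =====
-- B's fold equals: pass 1's answer if it finds one, else the fallback if already set, else pass 2's answer.
theorem nusLoopB_eq (answers : List (String × String)) (asked_slots : List String) :
    ∀ (L : List String) (fb : Option String),
      nusLoopB answers asked_slots fb L =
        match nusLoop1 answers asked_slots L with
        | some s => some s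
        | none =>
          match fb with
          | some f => some f
          | none => nusLoop2 asked_slots L := by
  intro L
  induction L with
  | nil => intro fb; cases fb <;> rfl
  | cons slot rest ih =>
    intro fb
    by_cases hask : slot ∈ asked_slots
    · by_cases hblank : PySem.Str.strip ((PySem.Dict.mk answers).getD slot "") = ""
      · simp [nusLoopB, nusLoop1, nusLoop2, hask, hblank, ih]
      · simp [nusLoopB, nusLoop1, nusLoop2, hask, hblank, ih]
    · by_cases hblank : PySem.Str.strip ((PySem.Dict.mk answers).getD slot "") = ""
      · simp [nusLoopB, nusLoop1, nusLoop2, hask, hblank]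
      · cases fb with
        | none => simp [nusLoopB, nusLoop1, nusLoop2, hask, hblank, ih]
        | some f => simp [nusLoopB, nusLoop1, nusLoop2, hask, hblank, ih]

-- ===== VERDICT (by name: the statement is the Claim_ definition above) =====
theorem next_unasked_slot_py_spec : Claim_equal_next_unasked_slot_py := by
  intro answers asked_slots _
  unfold Spec_next_unasked_slot_py next_unasked_slot_py next_unasked_slot_py_alt
  rw [nusLoopB_eq]
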